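-- pv_equiv track=rewrite | github.com/RaidenE1/SysY-Compiler | Labs/challenge/SCE/main.py | get_arr_name
-- ===== SOURCE A (Python) =====
-- def get_arr_name(brackets, pos):
--     if pos == len(brackets):
--         return ['i32']
--     else:
--         head = ['['+str(brackets[pos]), 'x']
--         bottle = get_arr_name(brackets, pos+1)
--         bottle[-1] += ']'
--         return head + bottle
-- ===== SOURCE B (Python) =====
-- def get_arr_name(brackets, pos):
--     n = len(brackets)
--     toks = []
--     for i in range(pos, n):
--         toks += ['[' + str(brackets[i]), 'x']
--     toks.append('i32' + ']' * (n - pos))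
--     return toks
-- ===== Notes on version B (the rewrite author's own statement) =====
-- stated objective: simpler
-- what changed: Replaces A's recursion (which appends ']' to the last token at every unwinding level) with a single forward loop emitting the bracket tokens and one final 'i32' token carrying all len(brackets)-pos closing brackets at once.
import Mathlib
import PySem

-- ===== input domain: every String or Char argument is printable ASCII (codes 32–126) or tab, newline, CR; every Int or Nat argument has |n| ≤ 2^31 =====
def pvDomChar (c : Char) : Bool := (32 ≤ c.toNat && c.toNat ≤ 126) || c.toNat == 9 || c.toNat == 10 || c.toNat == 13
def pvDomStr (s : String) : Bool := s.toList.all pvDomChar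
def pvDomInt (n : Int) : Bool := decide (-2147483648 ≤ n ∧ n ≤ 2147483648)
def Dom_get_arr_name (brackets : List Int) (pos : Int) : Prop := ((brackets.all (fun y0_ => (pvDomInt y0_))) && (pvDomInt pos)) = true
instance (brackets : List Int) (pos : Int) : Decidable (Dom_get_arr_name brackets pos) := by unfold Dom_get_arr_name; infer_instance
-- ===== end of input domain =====

-- B replaces A's recursion (which patches ']' onto the last token at every unwinding step)
-- by a single forward loop that emits the tokens and then one final 'i32' + ']'*(n-pos) token: simpler.

-- ===== PORT A =====
-- bottle[-1] += ']' : append a string to the last element (bottle is always nonempty here)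
def pvAppendLast : List String → String → List String
  | [], _ => []
  | [a], s => [a ++ s]
  | a :: b :: rest, s => a :: pvAppendLast (b :: rest) s

def get_arr_name (brackets : List Int) (pos : Int) : List String :=
  if pos = (brackets.length : Int) then ["i32"]
  else
    match h : PySem.List.pyGet? brackets pos with
    | none => []  -- Python raises IndexError here; excluded by Pre_
    | some v =>
      let head := ["[" ++ PySem.Int.toStr v, "x"]
      let bottle := get_arr_name brackets (pos + 1)
      head ++ pvAppendLast bottle "]"
termination_by ((brackets.length : Int) + 1 - pos).toNat
decreasing_by
  have : ¬ PySem.List.pyGet? brackets pos = none := by simp [h]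
  rw [PySem.List.pyGet?_eq_none_iff] at this
  unfold PySem.Raise.InRange at this
  omega

-- ===== PORT B =====
def get_arr_name_alt (brackets : List Int) (pos : Int) : List String :=
  let n : Int := brackets.length
  let toks : List String :=
    (PySem.List.pyRange pos n 1).foldl
      (fun acc i => acc ++ ["[" ++ PySem.Int.toStr (PySem.List.pyGetD brackets i 0), "x"]) []
  toks ++ ["i32" ++ String.ofList (List.replicate (n - pos).toNat ']')]

-- ===== PRECONDITION & SPEC =====
-- Pre_ excludes exactly the inputs where A raises IndexError: pos > len(brackets) or pos < -len(brackets).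
def Pre_get_arr_name (brackets : List Int) (pos : Int) : Prop :=
  -(brackets.length : Int) ≤ pos ∧ pos ≤ (brackets.length : Int)
instance (brackets : List Int) (pos : Int) : Decidable (Pre_get_arr_name brackets pos) := by
  unfold Pre_get_arr_name; infer_instance

def pvWitness_get_arr_name : List Int × Int := ([2, 3], 0)

def Spec_get_arr_name (brackets : List Int) (pos : Int) (out : List String) : Prop := out = get_arr_name_alt brackets pos
instance (brackets : List Int) (pos : Int) (out : List String) : Decidable (Spec_get_arr_name brackets pos out) := by unfold Spec_get_arr_name; infer_instance

-- ===== CLAIM (what is proved, stated in full; the proofs are below) =====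
def Claim_equal_get_arr_name : Prop := ∀ (brackets : List Int) (pos : Int), Dom_get_arr_name brackets pos → Pre_get_arr_name brackets pos → Spec_get_arr_name brackets pos (get_arr_name brackets pos)

-- ===== LEMMAS AND PROOFS =====

theorem pvAppendLast_append_singleton (xs : List String) (y s : String) :
    pvAppendLast (xs ++ [y]) s = xs ++ [y ++ s] := by
  induction xs with
  | nil => rfl
  | cons a rest ih =>
    cases rest with
    | nil => simp [pvAppendLast]
    | cons b r => simpa [pvAppendLast] using ih

theorem alt_flatMap (brackets : List Int) (pos : Int) :
    get_arr_name_alt brackets pos =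
      (PySem.List.pyRange pos brackets.length 1).flatMap
        (fun i => ["[" ++ PySem.Int.toStr (PySem.List.pyGetD brackets i 0), "x"]) ++
      ["i32" ++ String.ofList (List.replicate ((brackets.length : Int) - pos).toNat ']')] := by
  show List.foldl _ [] _ ++ _ = _
  rw [PySem.List.foldl_append_eq_flatMap]
  simp

theorem rep_snoc (s : String) (k : Nat) :
    (s ++ String.ofList (List.replicate k ']')) ++ "]" =
      s ++ String.ofList (List.replicate (k + 1) ']') := by
  apply String.ext
  simp [List.replicate_succ']

theorem main_eq (brackets : List Int) (k : Nat) :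
    ∀ pos : Int, -(brackets.length : Int) ≤ pos → pos + k = brackets.length →
      get_arr_name brackets pos = get_arr_name_alt brackets pos := by
  induction k with
  | zero =>
    intro pos _ hk
    have hp : pos = (brackets.length : Int) := by omega
    rw [alt_flatMap, PySem.List.pyRange_one_eq_nil (by omega)]
    unfold get_arr_name
    rw [if_pos hp]
    have h0 : ((brackets.length : Int) - pos).toNat = 0 := by omega
    simp [h0]
  | succ k ih =>
    intro pos hlo hk
    have hlt : pos < (brackets.length : Int) := by omega
    have hin : PySem.Raise.InRange brackets.length pos := by
      unfold PySem.Raise.InRange; omega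
    obtain ⟨v, hv⟩ : ∃ v, PySem.List.pyGet? brackets pos = some v := by
      rcases h : PySem.List.pyGet? brackets pos with _ | v
      · rw [PySem.List.pyGet?_eq_none_iff] at h; exact absurd hin h
      · exact ⟨v, rfl⟩
    have hne : pos ≠ (brackets.length : Int) := by omega
    unfold get_arr_name
    rw [if_neg hne, hv]
    have hrec := ih (pos + 1) (by omega) (by omega)
    rw [hrec, alt_flatMap, alt_flatMap,
        PySem.List.pyRange_one_cons hlt]
    have hgetD : PySem.List.pyGetD brackets pos 0 = v := by
      simp [PySem.List.pyGetD, hv]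
    simp only [List.flatMap_cons, hgetD]
    rw [pvAppendLast_append_singleton]
    have hkk : ((brackets.length : Int) - (pos + 1)).toNat = k := by omega
    have hkk1 : ((brackets.length : Int) - pos).toNat = k + 1 := by omega
    rw [hkk, hkk1, rep_snoc]
    simp

-- ===== VERDICT (by name: the statement is the Claim_ definition above) =====
theorem get_arr_name_spec : Claim_equal_get_arr_name := by
  intro brackets pos _ hpre
  unfold Spec_get_arr_name
  exact main_eq brackets ((brackets.length : Int) - pos).toNat pos hpre.1 (by
    have := hpre.2; omega)
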